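-- pv_equiv track=rewrite | github.com/Larry-Zheng/extension-for-labelme | generateLabel.py | pointsDivByLabel
-- ===== SOURCE A (Python) =====
-- def pointsDivByLabel(listOfDict):
--     """传入data['shapes'] 用label 将各个类分开"""
--     res = dict()
--     for shape in listOfDict:
--         if shape['label'] in res.keys():
--             res[shape['label']].append(shape)
--         else:
--             res[shape['label']] = [shape]
--     return res
-- ===== SOURCE B (Python) =====
-- def pointsDivByLabel(listOfDict):
--     """传入data['shapes'] 用label 将各个类分开"""
--     labels = dict.fromkeys(shape['label'] for shape in listOfDict)
--     return {lab: [shape for shape in listOfDict if shape['label'] == lab]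
--             for lab in labels}
-- ===== Notes on version B (the rewrite author's own statement) =====
-- stated objective: alternative
-- what changed: A builds the grouping in one incremental pass with an in/append/else branch on a dict; B first deduplicates the labels in first-occurrence order (dict.fromkeys) and then builds each group with a separate filter pass over the whole list.
import Mathlib
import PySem

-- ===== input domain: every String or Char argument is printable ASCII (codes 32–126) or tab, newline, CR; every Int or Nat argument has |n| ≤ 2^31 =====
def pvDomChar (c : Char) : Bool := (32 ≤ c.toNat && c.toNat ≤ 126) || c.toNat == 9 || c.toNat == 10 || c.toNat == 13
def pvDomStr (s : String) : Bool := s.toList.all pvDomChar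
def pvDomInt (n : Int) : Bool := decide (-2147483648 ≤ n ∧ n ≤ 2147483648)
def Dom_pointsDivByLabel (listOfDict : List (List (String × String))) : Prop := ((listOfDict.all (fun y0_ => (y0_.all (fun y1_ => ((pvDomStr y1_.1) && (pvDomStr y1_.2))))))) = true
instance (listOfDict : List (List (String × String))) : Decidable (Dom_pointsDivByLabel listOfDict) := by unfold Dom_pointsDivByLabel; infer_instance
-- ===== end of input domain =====

-- B replaces A's single incremental dict pass (in/append/else) by dedup-labels-then-filter; alternative decomposition, same results.


-- shape['label']: first-match lookup in the shape dict; "" only reached outside Pre_ (Python raises KeyError there)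
def pvLabel (shape : List (String × String)) : String :=
  (PySem.Dict.getD (PySem.Dict.mk shape) "label" "")

-- ===== PORT A =====
def pointsDivByLabel (listOfDict : List (List (String × String))) : List (String × List (List (String × String))) :=
  (listOfDict.foldl
    (fun res shape =>
      if res.contains (pvLabel shape) then
        res.modify (pvLabel shape) [] (fun g => g ++ [shape])
      else
        res.insert (pvLabel shape) [shape])
    PySem.Dict.empty).items

-- ===== PORT B =====
def pointsDivByLabel_alt (listOfDict : List (List (String × String))) : List (String × List (List (String × String))) :=
  (PySem.List.dedup (listOfDict.map pvLabel)).map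
    (fun lab => (lab, listOfDict.filter (fun shape => pvLabel shape == lab)))

-- ===== PRECONDITION & SPEC =====
-- Pre_ excludes shapes without a 'label' key, on which Python's shape['label'] raises KeyError in both A and B.
def Pre_pointsDivByLabel (listOfDict : List (List (String × String))) : Prop :=
  ∀ shape ∈ listOfDict, "label" ∈ shape.map Prod.fst
instance (listOfDict : List (List (String × String))) : Decidable (Pre_pointsDivByLabel listOfDict) := by unfold Pre_pointsDivByLabel; infer_instance

def pvWitness_pointsDivByLabel : (List (List (String × String))) :=
  [[("label", "a"), ("p", "1")], [("label", "b")], [("label", "a"), ("p", "2")]]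

def Spec_pointsDivByLabel (listOfDict : List (List (String × String))) (out : List (String × List (List (String × String)))) : Prop := out = pointsDivByLabel_alt listOfDict
instance (listOfDict : List (List (String × String))) (out : List (String × List (List (String × String)))) : Decidable (Spec_pointsDivByLabel listOfDict out) := by unfold Spec_pointsDivByLabel; infer_instance

-- ===== CLAIM (what is proved, stated in full; the proofs are below) =====
def Claim_equal_pointsDivByLabel : Prop := ∀ (listOfDict : List (List (String × String))), Dom_pointsDivByLabel listOfDict → Pre_pointsDivByLabel listOfDict → Spec_pointsDivByLabel listOfDict (pointsDivByLabel listOfDict)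

-- ===== LEMMAS AND PROOFS =====

-- A's branching step is exactly the modify step
lemma pvStep_eq_modify (res : PySem.Dict String (List (List (String × String)))) (shape : List (String × String)) :
    (if res.contains (pvLabel shape) then
        res.modify (pvLabel shape) [] (fun g => g ++ [shape])
      else
        res.insert (pvLabel shape) [shape])
    = res.modify (pvLabel shape) [] (fun g => g ++ [shape]) := by
  split_ifs with h
  · rfl
  · have hc : res.contains (pvLabel shape) = false := by simpa using h
    simp [PySem.Dict.modify,
      PySem.Dict.getD_of_not_contains (d := res) (k := pvLabel shape) (d0 := []) hc]

-- a dict with nodup keys is its keys paired with their getD values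
lemma items_eq_keys_map (d : PySem.Dict String (List (List (String × String)))) (h : d.keys.Nodup) :
    d.items = d.keys.map (fun k => (k, d.getD k [])) := by
  have h1 : d.keys.map (fun k => (k, d.getD k [])) = d.items.map (fun p => (p.1, d.getD p.1 [])) := by
    simp [PySem.Dict.keys, List.map_map, Function.comp]
  rw [h1]
  have h2 : ∀ p ∈ d.items, (p.1, d.getD p.1 ([] : List (List (String × String)))) = p := by
    intro p hp
    have := PySem.Dict.getD_of_mem_items (d := d) (k := p.1) (v := p.2) (d0 := []) (by simpa using hp) h
    simp [this]
  rw [List.map_congr_left h2]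
  simp

-- ===== VERDICT (by name: the statement is the Claim_ definition above) =====
theorem pointsDivByLabel_spec : Claim_equal_pointsDivByLabel := by
  intro l _ _
  show pointsDivByLabel l = pointsDivByLabel_alt l
  unfold pointsDivByLabel pointsDivByLabel_alt
  have hstep : (fun (res : PySem.Dict String (List (List (String × String)))) shape =>
      if res.contains (pvLabel shape) then
        res.modify (pvLabel shape) [] (fun g => g ++ [shape])
      else
        res.insert (pvLabel shape) [shape])
      = (fun res shape => res.modify (pvLabel shape) [] (fun g => g ++ [shape])) := by
    funext res shape; exact pvStep_eq_modify res shape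
  rw [hstep]
  set D := l.foldl (fun res shape => res.modify (pvLabel shape) [] (fun g => g ++ [shape])) PySem.Dict.empty with hD
  have hkeys : D.keys = PySem.List.dedup (l.map pvLabel) := by
    rw [hD, PySem.Dict.keys_foldl_modify_key]
    simp [PySem.Set.update, PySem.Set.ofList_eq_foldl, PySem.List.dedup_eq_ofList, PySem.Dict.keys_empty]
  have hnodup : D.keys.Nodup := by
    rw [hD]
    exact PySem.Dict.nodup_keys_foldl_modify_key l pvLabel [] (fun d s g => g ++ [s]) PySem.Dict.empty (by simp [PySem.Dict.keys_empty])
  have hgetD : ∀ c, D.getD c [] = l.filter (fun s => pvLabel s == c) := by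
    intro c
    have hm : D = (l.map (fun s => (pvLabel s, s))).foldl
        (fun d p => d.modify p.1 [] (fun g => g ++ [p.2])) PySem.Dict.empty := by
      rw [hD, List.foldl_map]
    rw [hm, PySem.Dict.getD_foldl_modify_append]
    rw [List.filter_map]
    simp [Function.comp_def]
  rw [items_eq_keys_map D hnodup, hkeys]
  exact List.map_congr_left (fun lab _ => by rw [hgetD lab])
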